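-- pv_equiv track=rewrite | github.com/Alex-42-AI/Artificial-Intelligence | nbc/some_political_shit.py | fill_missing_by_class
-- ===== SOURCE A (Python) =====
-- from collections import defaultdict, Counter
--
-- def fill_missing_by_class(X, y):
--     res = [row.copy() for row in X]
--     n = len(X[0])
--
--     for cls in {"republican", "democrat"}:
--         indices = [i for i, label in enumerate(y) if label == cls]
--
--         for j in range(n):
--             values = [X[i][j] for i in indices if X[i][j] != "?"]
--
--             if not values:
--                 continue
--
--             most_common = Counter(values).most_common(1)[0][0]
--
--             for i in indices:
--                 if res[i][j] == "?":  # enlightened centrist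
--                     res[i][j] = most_common
--
--     return res
-- ===== SOURCE B (Python) =====
-- from collections import Counter
--
-- def fill_missing_by_class(X, y):
--     n = len(X[0])
--     # one sweep over all rows: per (class, column) frequency tables,
--     # counts accumulated in increasing row order (same tie-breaking as Counter(values))
--     counts = {}
--     for i, label in enumerate(y):
--         if label == "republican" or label == "democrat":
--             for j in range(n):
--                 v = X[i][j]
--                 if v != "?":
--                     c = counts.setdefault((label, j), Counter())
--                     c[v] += 1
--     res = []
--     for i, row in enumerate(X):
--         if i < len(y) and (y[i] == "republican" or y[i] == "democrat"):
--             label = y[i]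
--             res.append([_pick(v, counts.get((label, j)))
--                         for j, v in enumerate(row)])
--         else:
--             res.append(list(row))
--     return res
--
-- def _pick(v, c):
--     return c.most_common(1)[0][0] if v == "?" and c else v
-- ===== Notes on version B (the rewrite author's own statement) =====
-- stated objective: alternative
-- what changed: A rescans X once per class and per column to build each Counter and mutates a copy of X in place; B builds every (class, column) Counter in one sweep over the rows and then produces the result in a single fill pass over all cells.
import Mathlib
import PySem

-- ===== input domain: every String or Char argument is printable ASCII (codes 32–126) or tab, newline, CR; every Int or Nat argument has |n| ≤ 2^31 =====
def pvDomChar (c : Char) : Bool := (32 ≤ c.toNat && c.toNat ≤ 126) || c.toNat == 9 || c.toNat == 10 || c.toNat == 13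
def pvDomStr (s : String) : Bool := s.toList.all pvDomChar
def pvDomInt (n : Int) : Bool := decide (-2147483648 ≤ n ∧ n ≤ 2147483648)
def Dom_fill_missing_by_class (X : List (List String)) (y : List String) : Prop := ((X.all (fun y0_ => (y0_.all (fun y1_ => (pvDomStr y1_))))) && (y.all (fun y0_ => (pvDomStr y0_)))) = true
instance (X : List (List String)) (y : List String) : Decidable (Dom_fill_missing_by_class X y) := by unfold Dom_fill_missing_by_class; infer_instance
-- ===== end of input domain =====

-- B replaces A's per-class/per-column rescans of X by ONE sweep over the rows that builds every
-- (class, column) frequency table at once, then fills all cells in a single second pass.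

-- shared helpers (both Pythons index cells X[i][j] and take Counter.most_common(1)[0][0]):
-- exact for the nonnegative in-range indices both programs use; out of range they return defaults
-- (Python raises there; those inputs are excluded by Pre_ below)
def pvGetCell (r : List (List String)) (i j : Nat) : String := (r.getD i []).getD j ""
def pvSetCell (r : List (List String)) (i j : Nat) (v : String) : List (List String) :=
  r.set i ((r.getD i []).set j v)
-- Counter.most_common(1)[0][0]: the first key of maximal count, in insertion order
def pvMostCommon1 (d : PySem.Dict String Int) : String :=
  ((d.items.foldl (fun best p =>
      match best with
      | none => some p
      | some q => if q.2 < p.2 then some p else some q) none).map Prod.fst).getD ""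

-- ===== PORT A =====
def fill_missing_by_class (X : List (List String)) (y : List String) : List (List String) :=
  let res := X.map (fun row => row)                           -- res = [row.copy() for row in X] (value semantics)
  let n := ((PySem.List.pyGet? X (0 : Int)).getD []).length   -- n = len(X[0]); X = [] raises IndexError (outside Pre_)
  (PySem.Set.ofList ["republican", "democrat"]).foldl (fun res cls =>
    -- indices = [i for i, label in enumerate(y) if label == cls] (enumerate positions, as naturals)
    let indices := (List.range y.length).filter (fun i => y.getD i "" = cls)
    (List.range n).foldl (fun res j =>
      -- values = [X[i][j] for i in indices if X[i][j] != "?"]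
      let values := (indices.filter (fun i => pvGetCell X i j ≠ "?")).map (fun i => pvGetCell X i j)
      if values = [] then res
      else
        let most_common := pvMostCommon1 (PySem.Dict.counter values)
        indices.foldl (fun res i =>
          if pvGetCell res i j = "?" then pvSetCell res i j most_common else res) res) res) res

-- ===== PORT B =====
def fill_missing_by_class_alt (X : List (List String)) (y : List String) : List (List String) :=
  let n := ((PySem.List.pyGet? X (0 : Int)).getD []).length   -- n = len(X[0])
  -- one sweep over the rows: counts[(label, j)] = Counter of the non-'?' values of column j
  -- among the rows labelled label, accumulated in increasing row order
  let counts : PySem.Dict (String × Nat) (PySem.Dict String Int) :=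
    (List.range y.length).foldl (fun d i =>                   -- for i, label in enumerate(y)
      let label := y.getD i ""
      if label = "republican" ∨ label = "democrat" then
        (List.range n).foldl (fun d j =>
          let v := pvGetCell X i j
          if v ≠ "?" then
            -- c = counts.setdefault((label, j), Counter()); c[v] += 1 (updated Counter stored back)
            let c := (d.get? (label, j)).getD PySem.Dict.empty
            d.insert (label, j) (c.modify v 0 (· + 1))
          else d) d
      else d) PySem.Dict.empty
  -- second pass: rebuild each row, filling '?' cells from their (class, column) table
  -- (stored Counters are never empty, so Python's `v == "?" and c` is: the lookup succeeded and v == "?")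
  X.mapIdx (fun i row =>                                      -- for i, row in enumerate(X)
    if i < y.length ∧ (y.getD i "" = "republican" ∨ y.getD i "" = "democrat") then
      row.mapIdx (fun j v =>                                  -- for j, v in enumerate(row)
        match counts.get? (y.getD i "", j) with
        | some c => if v = "?" then pvMostCommon1 c else v
        | none => v)
    else row)

-- ===== PRECONDITION & SPEC =====
-- exactly the inputs on which Python A returns: X nonempty, and every row whose label is one of the
-- two classes is long enough for the len(X[0]) column reads (an index i ≥ len(X) only occurs in a
-- read when len(X[0]) > 0, and then the length condition below already fails at that i)
def Pre_fill_missing_by_class (X : List (List String)) (y : List String) : Prop :=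
  X ≠ [] ∧ ∀ i, i < y.length →
    (y.getD i "" = "republican" ∨ y.getD i "" = "democrat") →
    (X.headD []).length ≤ (X.getD i []).length
instance (X : List (List String)) (y : List String) : Decidable (Pre_fill_missing_by_class X y) := by
  unfold Pre_fill_missing_by_class; infer_instance

def pvWitness_fill_missing_by_class : List (List String) × List String :=
  ([["?", "y"], ["y", "n"]], ["republican", "republican"])

def Spec_fill_missing_by_class (X : List (List String)) (y : List String) (out : List (List String)) : Prop := out = fill_missing_by_class_alt X y
instance (X : List (List String)) (y : List String) (out : List (List String)) : Decidable (Spec_fill_missing_by_class X y out) := by unfold Spec_fill_missing_by_class; infer_instance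

-- ===== CLAIM (what is proved, stated in full; the proofs are below) =====
def Claim_equal_fill_missing_by_class : Prop := ∀ (X : List (List String)) (y : List String), Dom_fill_missing_by_class X y → Pre_fill_missing_by_class X y → Spec_fill_missing_by_class X y (fill_missing_by_class X y)

-- ===== LEMMAS AND PROOFS =====
-- n = len(X[0]) as both ports compute it
def pvN (X : List (List String)) : Nat := ((PySem.List.pyGet? X (0 : Int)).getD []).length
-- the non-'?' entries of column j among the first m rows labelled cls (increasing row order)
def pvVals (X : List (List String)) (y : List String) (cls : String) (j m : Nat) : List String :=
  ((((List.range m).filter (fun i => y.getD i "" = cls)).filter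
      (fun i => pvGetCell X i j ≠ "?")).map (fun i => pvGetCell X i j))
-- the per-class column mode both programs fill with
def pvMode (X : List (List String)) (y : List String) (cls : String) (j : Nat) : String :=
  pvMostCommon1 (PySem.Dict.counter (pvVals X y cls j y.length))
-- the common pointwise description of the result
def pvRef (X : List (List String)) (y : List String) : List (List String) :=
  X.mapIdx (fun i row => row.mapIdx (fun j v =>
    if i < y.length ∧ (y.getD i "" = "republican" ∨ y.getD i "" = "democrat")
        ∧ j < pvN X ∧ v = "?" ∧ pvVals X y (y.getD i "") j y.length ≠ []
    then pvMode X y (y.getD i "") j else v))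
-- one class pass of A (the body of A's outer loop), named for the proofs
def pvClsStep (X : List (List String)) (y : List String) (cls : String)
    (res : List (List String)) : List (List String) :=
  let indices := (List.range y.length).filter (fun i => y.getD i "" = cls)
  (List.range (pvN X)).foldl (fun res j =>
    let values := (indices.filter (fun i => pvGetCell X i j ≠ "?")).map (fun i => pvGetCell X i j)
    if values = [] then res
    else
      let most_common := pvMostCommon1 (PySem.Dict.counter values)
      indices.foldl (fun res i =>
        if pvGetCell res i j = "?" then pvSetCell res i j most_common else res) res) res

theorem getD_lt (r : List (List String)) (i : Nat) (h : i < r.length) : r.getD i [] = r[i] := by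
  simp [List.getD, List.getElem?_eq_getElem h]

theorem getD_ge (r : List (List String)) (i : Nat) (h : r.length ≤ i) : r.getD i [] = [] := by
  simp [List.getD, List.getElem?_eq_none_iff.mpr h]

theorem getDs_lt (r : List String) (i : Nat) (h : i < r.length) : r.getD i "" = r[i] := by
  simp [List.getD, List.getElem?_eq_getElem h]

theorem getDs_ge (r : List String) (i : Nat) (h : r.length ≤ i) : r.getD i "" = "" := by
  simp [List.getD, List.getElem?_eq_none_iff.mpr h]


theorem pvGetCell_oob (r : List (List String)) (i j : Nat)
    (h : ¬ (i < r.length ∧ j < (r.getD i []).length)) : pvGetCell r i j = "" := by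
  unfold pvGetCell
  by_cases hi : i < r.length
  · exact getDs_ge _ _ (by omega)
  · rw [getD_ge r i (by omega)]; rfl

theorem pvGetCell_setCell (r : List (List String)) (i j : Nat) (v : String) (a b : Nat) :
    pvGetCell (pvSetCell r i j v) a b =
      if a = i ∧ b = j ∧ i < r.length ∧ j < (r.getD i []).length then v
      else pvGetCell r a b := by
  unfold pvGetCell pvSetCell
  by_cases hi : i < r.length
  · have hrow : r.getD i [] = r[i] := getD_lt r i hi
    rw [hrow]
    by_cases hj : j < r[i].length
    · by_cases ha : a = i
      · subst ha
        rw [getD_lt _ _ (by simpa using hi), List.getElem_set_self]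
        by_cases hb : b = j
        · subst hb
          rw [getDs_lt _ _ (by simpa using hj), List.getElem_set_self]
          simp [hi, hj]
        · have : ∀ d : String, (r[a].set j v).getD b d = r[a].getD b d := by
            intro d
            by_cases hbl : b < r[a].length
            · rw [List.getD_eq_getElem _ _ (by simpa using hbl), List.getD_eq_getElem _ _ hbl,
                List.getElem_set_ne (by omega)]
            · rw [List.getD_eq_default _ _ (by simp; omega),
                List.getD_eq_default _ _ (by omega)]
          rw [this, hrow]
          simp [hb]
      · have : (r.set i (r[i].set j v)).getD a [] = r.getD a [] := by
          by_cases hal : a < r.length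
          · rw [getD_lt _ _ (by simpa using hal), getD_lt _ _ hal, List.getElem_set_ne (by omega)]
          · rw [getD_ge _ _ (by simp; omega), getD_ge _ _ (by omega)]
        rw [this]
        simp [ha]
    · have h1 : r[i].set j v = r[i] := List.set_eq_of_length_le (by omega)
      rw [h1, List.set_getElem_self]
      simp [hj]
  · have h1 : r.set i ((r.getD i []).set j v) = r := List.set_eq_of_length_le (by omega)
    rw [h1]
    simp [hi]

theorem pvSetCell_length (r : List (List String)) (i j : Nat) (v : String) :
    (pvSetCell r i j v).length = r.length := by
  simp [pvSetCell]

theorem pvSetCell_rowlen (r : List (List String)) (i j : Nat) (v : String) (a : Nat) :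
    ((pvSetCell r i j v).getD a []).length = (r.getD a []).length := by
  unfold pvSetCell
  by_cases hi : i < r.length
  · by_cases ha : a = i
    · subst ha
      rw [getD_lt _ _ (by simpa using hi), List.getElem_set_self, getD_lt _ _ hi]
      simp
    · have h1 : (r.set i ((r.getD i []).set j v)).getD a [] = r.getD a [] := by
        by_cases hal : a < r.length
        · rw [getD_lt _ _ (by simpa using hal), getD_lt _ _ hal, List.getElem_set_ne (by omega)]
        · rw [getD_ge _ _ (by simp; omega), getD_ge _ _ (by omega)]
      rw [h1]
  · rw [List.set_eq_of_length_le (by omega)]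

theorem pvFill_length (j : Nat) (mc : String) (is : List Nat) (r : List (List String)) :
    (is.foldl (fun r i => if pvGetCell r i j = "?" then pvSetCell r i j mc else r) r).length
      = r.length := by
  induction is generalizing r with
  | nil => rfl
  | cons i t ih =>
    simp only [List.foldl_cons]
    rw [ih]
    split
    · exact pvSetCell_length r i j mc
    · rfl

theorem pvFill_rowlen (j : Nat) (mc : String) (is : List Nat) (r : List (List String)) (a : Nat) :
    ((is.foldl (fun r i => if pvGetCell r i j = "?" then pvSetCell r i j mc else r) r).getD a []).length
      = (r.getD a []).length := by
  induction is generalizing r with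
  | nil => rfl
  | cons i t ih =>
    simp only [List.foldl_cons]
    rw [ih]
    split
    · exact pvSetCell_rowlen r i j mc a
    · rfl

theorem pvFill_get (j : Nat) (mc : String) (is : List Nat) (hnd : is.Nodup)
    (r : List (List String)) (a b : Nat) :
    pvGetCell (is.foldl (fun r i => if pvGetCell r i j = "?" then pvSetCell r i j mc else r) r) a b
      = if a ∈ is ∧ b = j ∧ pvGetCell r a b = "?" then mc else pvGetCell r a b := by
  induction is generalizing r with
  | nil => simp
  | cons i t ih =>
    simp only [List.foldl_cons]
    have hnd' : t.Nodup := (List.nodup_cons.mp hnd).2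
    have hni : i ∉ t := (List.nodup_cons.mp hnd).1
    set r' := if pvGetCell r i j = "?" then pvSetCell r i j mc else r with hr'
    have hother : ∀ a' b', a' ≠ i → pvGetCell r' a' b' = pvGetCell r a' b' := by
      intro a' b' hne
      rw [hr']
      split
      · rw [pvGetCell_setCell]
        simp [hne]
      · rfl
    rw [ih hnd' r']
    by_cases ha : a = i
    · subst ha
      have h2 : pvGetCell r' a b = if b = j ∧ pvGetCell r a b = "?" then mc else pvGetCell r a b := by
        rw [hr']
        by_cases hc : pvGetCell r a j = "?"
        · rw [if_pos hc, pvGetCell_setCell]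
          have hrange : a < r.length ∧ j < (r.getD a []).length := by
            by_contra hcon
            rw [pvGetCell_oob r a j hcon] at hc
            simp at hc
          by_cases hb : b = j
          · subst hb
            rw [if_pos ⟨rfl, rfl, hrange.1, hrange.2⟩, if_pos ⟨rfl, hc⟩]
          · rw [if_neg (by simp [hb]), if_neg (by simp [hb])]
        · rw [if_neg hc]
          by_cases hb : b = j
          · subst hb; simp [hc]
          · simp [hb]
      rw [if_neg (by simp [hni]), h2]
      simp
    · rw [hother a b ha]
      by_cases hat : a ∈ t
      · simp [hat, ha]
      · simp [hat, ha]

theorem pvColFold_get (X : List (List String)) (y : List String) (cls : String) (n : Nat)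
    (res : List (List String)) (a b : Nat) :
    pvGetCell ((List.range n).foldl (fun res j =>
        let values := (((List.range y.length).filter (fun i => y.getD i "" = cls)).filter
            (fun i => pvGetCell X i j ≠ "?")).map (fun i => pvGetCell X i j)
        if values = [] then res
        else
          let most_common := pvMostCommon1 (PySem.Dict.counter values)
          ((List.range y.length).filter (fun i => y.getD i "" = cls)).foldl (fun res i =>
            if pvGetCell res i j = "?" then pvSetCell res i j most_common else res) res) res) a b
    = if b < n ∧ (a < y.length ∧ y.getD a "" = cls) ∧ pvGetCell res a b = "?"
          ∧ pvVals X y cls b y.length ≠ []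
      then pvMostCommon1 (PySem.Dict.counter (pvVals X y cls b y.length))
      else pvGetCell res a b := by
  have hnd : ((List.range y.length).filter (fun i => y.getD i "" = cls)).Nodup :=
    (List.nodup_range).filter _
  have hmem : ∀ a', a' ∈ (List.range y.length).filter (fun i => y.getD i "" = cls)
      ↔ (a' < y.length ∧ y.getD a' "" = cls) := by
    intro a'; simp [List.mem_filter]
  induction n with
  | zero => simp
  | succ n ih =>
    rw [List.range_succ, List.foldl_append, List.foldl_cons, List.foldl_nil]
    simp only []
    by_cases hv : pvVals X y cls n y.length = []
    · rw [if_pos (by exact hv), ih]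
      by_cases hb : b = n
      · subst hb; simp [hv]
      · have : (b < n + 1 ∧ (a < y.length ∧ y.getD a "" = cls) ∧ pvGetCell res a b = "?"
            ∧ pvVals X y cls b y.length ≠ [])
            ↔ (b < n ∧ (a < y.length ∧ y.getD a "" = cls) ∧ pvGetCell res a b = "?"
            ∧ pvVals X y cls b y.length ≠ []) := by
          constructor <;> rintro ⟨h1, h2⟩ <;> exact ⟨by omega, h2⟩
        rw [if_congr this rfl rfl]
    · rw [if_neg (by exact hv), pvFill_get _ _ _ hnd, ih]
      by_cases hb : b = n
      · subst hb
        simp only [hmem, lt_irrefl, false_and, if_false]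
        split_ifs <;> first | rfl | tauto
      · rw [if_neg (by rintro ⟨-, h, -⟩; exact hb h)]
        have : (b < n + 1 ∧ (a < y.length ∧ y.getD a "" = cls) ∧ pvGetCell res a b = "?"
            ∧ pvVals X y cls b y.length ≠ [])
            ↔ (b < n ∧ (a < y.length ∧ y.getD a "" = cls) ∧ pvGetCell res a b = "?"
            ∧ pvVals X y cls b y.length ≠ []) := by
          constructor <;> rintro ⟨h1, h2⟩ <;> exact ⟨by omega, h2⟩
        rw [if_congr this rfl rfl]

theorem pvClsStep_get (X : List (List String)) (y : List String) (cls : String)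
    (res : List (List String)) (a b : Nat) :
    pvGetCell (pvClsStep X y cls res) a b =
      if b < pvN X ∧ (a < y.length ∧ y.getD a "" = cls) ∧ pvGetCell res a b = "?"
          ∧ pvVals X y cls b y.length ≠ []
      then pvMode X y cls b else pvGetCell res a b := by
  unfold pvClsStep pvMode
  exact pvColFold_get X y cls (pvN X) res a b

theorem pvColFold_shape (X : List (List String)) (y : List String) (cls : String) (n : Nat)
    (res : List (List String)) :
    ((List.range n).foldl (fun res j =>
        let values := (((List.range y.length).filter (fun i => y.getD i "" = cls)).filter
            (fun i => pvGetCell X i j ≠ "?")).map (fun i => pvGetCell X i j)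
        if values = [] then res
        else
          let most_common := pvMostCommon1 (PySem.Dict.counter values)
          ((List.range y.length).filter (fun i => y.getD i "" = cls)).foldl (fun res i =>
            if pvGetCell res i j = "?" then pvSetCell res i j most_common else res) res) res).length
      = res.length ∧
    ∀ a, (((List.range n).foldl (fun res j =>
        let values := (((List.range y.length).filter (fun i => y.getD i "" = cls)).filter
            (fun i => pvGetCell X i j ≠ "?")).map (fun i => pvGetCell X i j)
        if values = [] then res
        else
          let most_common := pvMostCommon1 (PySem.Dict.counter values)
          ((List.range y.length).filter (fun i => y.getD i "" = cls)).foldl (fun res i =>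
            if pvGetCell res i j = "?" then pvSetCell res i j most_common else res) res) res).getD a []).length
      = (res.getD a []).length := by
  induction n with
  | zero => exact ⟨rfl, fun a => rfl⟩
  | succ n ih =>
    rw [List.range_succ]
    simp only [List.foldl_append, List.foldl_cons, List.foldl_nil]
    constructor
    · split
      · exact ih.1
      · rw [pvFill_length, ih.1]
    · intro a
      split
      · exact ih.2 a
      · rw [pvFill_rowlen, ih.2 a]

theorem pvClsStep_length (X : List (List String)) (y : List String) (cls : String)
    (res : List (List String)) : (pvClsStep X y cls res).length = res.length := by
  unfold pvClsStep
  exact (pvColFold_shape X y cls (pvN X) res).1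

theorem pvClsStep_rowlen (X : List (List String)) (y : List String) (cls : String)
    (res : List (List String)) (a : Nat) :
    ((pvClsStep X y cls res).getD a []).length = (res.getD a []).length := by
  unfold pvClsStep
  exact (pvColFold_shape X y cls (pvN X) res).2 a

theorem pvA_eq_clsStep (X : List (List String)) (y : List String) :
    fill_missing_by_class X y = pvClsStep X y "democrat" (pvClsStep X y "republican" X) := by
  have hset : PySem.Set.ofList ["republican", "democrat"] = ["republican", "democrat"] := by decide
  unfold fill_missing_by_class pvClsStep pvN
  rw [hset]
  simp only [List.foldl_cons, List.foldl_nil, List.map_id']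

theorem pvA_get (X : List (List String)) (y : List String) (a b : Nat) :
    pvGetCell (fill_missing_by_class X y) a b =
      if b < pvN X ∧ (a < y.length ∧ (y.getD a "" = "republican" ∨ y.getD a "" = "democrat"))
          ∧ pvGetCell X a b = "?" ∧ pvVals X y (y.getD a "") b y.length ≠ []
      then pvMode X y (y.getD a "") b else pvGetCell X a b := by
  rw [pvA_eq_clsStep, pvClsStep_get, pvClsStep_get]
  by_cases ha : a < y.length
  · by_cases h1 : y.getD a "" = "republican"
    · simp only [h1]
      split_ifs <;> simp_all
    · by_cases h2 : y.getD a "" = "democrat"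
      · simp only [h2]
        split_ifs <;> simp_all
      · rw [if_neg (by rintro ⟨-, ⟨-, h⟩, -⟩; exact h2 h),
            if_neg (by rintro ⟨-, ⟨-, h⟩, -⟩; exact h1 h),
            if_neg (by rintro ⟨-, ⟨-, h | h⟩, -⟩; exacts [h1 h, h2 h])]
  · rw [if_neg (by rintro ⟨-, ⟨h, -⟩, -⟩; exact ha h),
        if_neg (by rintro ⟨-, ⟨h, -⟩, -⟩; exact ha h),
        if_neg (by rintro ⟨-, ⟨h, -⟩, -⟩; exact ha h)]

theorem pvA_eq_ref (X : List (List String)) (y : List String) :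
    fill_missing_by_class X y = pvRef X y := by
  have hlenA : (fill_missing_by_class X y).length = X.length := by
    rw [pvA_eq_clsStep, pvClsStep_length, pvClsStep_length]
  have hrowA : ∀ a, ((fill_missing_by_class X y).getD a []).length = (X.getD a []).length := by
    intro a; rw [pvA_eq_clsStep, pvClsStep_rowlen, pvClsStep_rowlen]
  apply List.ext_getElem
  · rw [hlenA]; simp [pvRef]
  intro a ha1 ha2
  have haX : a < X.length := by rw [hlenA] at ha1; exact ha1
  apply List.ext_getElem
  · have h := hrowA a
    rw [getD_lt _ _ ha1, getD_lt _ _ haX] at h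
    rw [h]
    simp [pvRef]
  intro b hb1 hb2
  have hbX : b < X[a].length := by
    have h := hrowA a
    rw [getD_lt _ _ ha1, getD_lt _ _ haX] at h
    rw [h] at hb1; exact hb1
  have e1 : pvGetCell (fill_missing_by_class X y) a b = (fill_missing_by_class X y)[a][b] := by
    unfold pvGetCell
    rw [getD_lt _ _ ha1, getDs_lt _ _ hb1]
  have e2 : pvGetCell X a b = X[a][b] := by
    unfold pvGetCell
    rw [getD_lt _ _ haX, getDs_lt _ _ hbX]
  rw [← e1, pvA_get]
  simp only [pvRef, List.getElem_mapIdx]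
  rw [← e2]
  exact if_congr (by tauto) rfl rfl

theorem pvVals_succ (X : List (List String)) (y : List String) (cls : String) (j m : Nat) :
    pvVals X y cls j (m + 1) =
      pvVals X y cls j m ++
        (if y.getD m "" = cls ∧ pvGetCell X m j ≠ "?" then [pvGetCell X m j] else []) := by
  unfold pvVals
  rw [List.range_succ, List.filter_append, List.filter_append, List.map_append]
  congr 1
  by_cases h1 : y.getD m "" = cls
  · have h1' : y[m]?.getD "" = cls := by simpa [List.getD] using h1
    by_cases h2 : pvGetCell X m j ≠ "?" <;> simp [h1', h2]
  · have h1' : ¬ y[m]?.getD "" = cls := by simpa [List.getD] using h1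
    simp [h1']

theorem pvInner_get (X : List (List String)) (label : String) (i : Nat) (nn : Nat)
    (d : PySem.Dict (String × Nat) (PySem.Dict String Int)) (cls : String) (j : Nat) :
    ((List.range nn).foldl (fun d j =>
        let v := pvGetCell X i j
        if v ≠ "?" then
          let c := (d.get? (label, j)).getD PySem.Dict.empty
          d.insert (label, j) (c.modify v 0 (· + 1))
        else d) d).get? (cls, j) =
      if cls = label ∧ j < nn ∧ pvGetCell X i j ≠ "?" then
        some (((d.get? (label, j)).getD PySem.Dict.empty).modify (pvGetCell X i j) 0 (· + 1))
      else d.get? (cls, j) := by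
  induction nn with
  | zero => simp
  | succ nn ih =>
    rw [List.range_succ]
    simp only [List.foldl_append, List.foldl_cons, List.foldl_nil]
    by_cases hv : pvGetCell X i nn ≠ "?"
    · rw [if_pos hv]
      by_cases hk : cls = label ∧ j = nn
      · obtain ⟨hc, hj⟩ := hk
        subst hc; subst hj
        rw [PySem.Dict.get?_insert_self]
        rw [ih]
        rw [if_neg (by rintro ⟨-, h, -⟩; omega)]
        rw [if_pos ⟨rfl, by omega, hv⟩]
      · rw [PySem.Dict.get?_insert_of_ne _ _ (by
          intro h
          rw [Prod.mk.injEq] at h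
          exact hk h), ih]
        by_cases hcl : cls = label
        · subst hcl
          have hjn : j ≠ nn := fun h => hk ⟨rfl, h⟩
          by_cases hj : j < nn
          · by_cases hq : pvGetCell X i j ≠ "?"
            · rw [if_pos ⟨rfl, hj, hq⟩, if_pos ⟨rfl, by omega, hq⟩]
            · rw [if_neg (by tauto), if_neg (by tauto)]
          · rw [if_neg (by rintro ⟨-, h, -⟩; exact hj h), if_neg (by rintro ⟨-, h, -⟩; omega)]
        · rw [if_neg (by rintro ⟨h, -⟩; exact hcl h), if_neg (by rintro ⟨h, -⟩; exact hcl h)]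
    · rw [if_neg hv, ih]
      by_cases hj : j = nn
      · subst hj
        rw [if_neg (by rintro ⟨-, h, -⟩; omega), if_neg (by rintro ⟨-, -, h⟩; exact hv h)]
      · have : (cls = label ∧ j < nn + 1 ∧ pvGetCell X i j ≠ "?")
            ↔ (cls = label ∧ j < nn ∧ pvGetCell X i j ≠ "?") := by
          constructor <;> rintro ⟨h1, h2, h3⟩ <;> exact ⟨h1, by omega, h3⟩
        rw [if_congr this rfl rfl]

theorem pvSweep_get (X : List (List String)) (y : List String) (m : Nat) (cls : String) (j : Nat) :
    ((List.range m).foldl (fun d i =>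
        let label := y.getD i ""
        if label = "republican" ∨ label = "democrat" then
          (List.range ((PySem.List.pyGet? X (0 : Int)).getD []).length).foldl (fun d j =>
            let v := pvGetCell X i j
            if v ≠ "?" then
              let c := (d.get? (label, j)).getD PySem.Dict.empty
              d.insert (label, j) (c.modify v 0 (· + 1))
            else d) d
        else d) PySem.Dict.empty).get? (cls, j) =
      if (cls = "republican" ∨ cls = "democrat") ∧ j < pvN X ∧ pvVals X y cls j m ≠ [] then
        some (PySem.Dict.counter (pvVals X y cls j m))
      else none := by
  induction m with
  | zero =>
    simp [pvVals]
  | succ m ih =>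
    rw [List.range_succ]
    simp only [List.foldl_append, List.foldl_cons, List.foldl_nil]
    by_cases hl : y.getD m "" = "republican" ∨ y.getD m "" = "democrat"
    · rw [if_pos hl, pvInner_get]
      by_cases hcl : cls = y.getD m ""
      · rw [← hcl] at hl ⊢
        rw [ih]
        by_cases hn : j < pvN X
        · by_cases hq : pvGetCell X m j ≠ "?"
          · rw [if_pos ⟨rfl, hn, hq⟩]
            have hvs : pvVals X y cls j (m + 1) = pvVals X y cls j m ++ [pvGetCell X m j] := by
              rw [pvVals_succ, if_pos ⟨hcl.symm, hq⟩]
            by_cases hv : pvVals X y cls j m = []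
            · rw [if_neg (by tauto)]
              simp only [Option.getD_none]
              rw [hvs, hv, List.nil_append, if_pos ⟨hl, hn, by simp⟩]
              rfl
            · rw [if_pos ⟨hl, hn, hv⟩]
              simp only [Option.getD_some]
              rw [hvs, if_pos ⟨hl, hn, by simp⟩, PySem.Dict.counter_append_singleton]
          · rw [if_neg (by tauto)]
            have hvs : pvVals X y cls j (m + 1) = pvVals X y cls j m := by
              rw [pvVals_succ, if_neg (by tauto), List.append_nil]
            rw [hvs]
        · rw [if_neg (by tauto)]
          have hvs : pvVals X y cls j (m + 1) = pvVals X y cls j m ++ _ := pvVals_succ X y cls j m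
          rw [if_neg (by tauto), if_neg (by tauto)]
      · rw [if_neg (by tauto), ih]
        have hvs : pvVals X y cls j (m + 1) = pvVals X y cls j m := by
          rw [pvVals_succ, if_neg (by rintro ⟨h, -⟩; exact hcl h.symm), List.append_nil]
        rw [hvs]
    · rw [if_neg hl, ih]
      by_cases hc2 : cls = "republican" ∨ cls = "democrat"
      · have hvs : pvVals X y cls j (m + 1) = pvVals X y cls j m := by
          rw [pvVals_succ, if_neg (by rintro ⟨h, -⟩; exact hl (h ▸ hc2)), List.append_nil]
        rw [hvs]
      · rw [if_neg (by tauto), if_neg (by tauto)]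

theorem pvB_eq_ref (X : List (List String)) (y : List String) :
    fill_missing_by_class_alt X y = pvRef X y := by
  unfold fill_missing_by_class_alt pvRef
  apply List.ext_getElem
  · simp
  intro a ha1 ha2
  have haX : a < X.length := by simpa using ha1
  simp only [List.getElem_mapIdx]
  by_cases hg : a < y.length ∧ (y.getD a "" = "republican" ∨ y.getD a "" = "democrat")
  · rw [if_pos hg]
    apply List.ext_getElem
    · simp
    intro b hb1 hb2
    have hbX : b < X[a].length := by simpa using hb1
    simp only [List.getElem_mapIdx]
    rw [pvSweep_get X y y.length (y.getD a "") b]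
    by_cases hc : b < pvN X ∧ pvVals X y (y.getD a "") b y.length ≠ []
    · rw [if_pos ⟨hg.2, hc.1, hc.2⟩]
      show (if X[a][b] = "?" then pvMostCommon1 (PySem.Dict.counter (pvVals X y (y.getD a "") b y.length)) else X[a][b]) = _
      by_cases hv : X[a][b] = "?"
      · rw [if_pos hv, if_pos ⟨hg.1, hg.2, hc.1, hv, hc.2⟩]
        rfl
      · rw [if_neg hv, if_neg (by rintro ⟨-, -, -, h, -⟩; exact hv h)]
    · rw [if_neg (by rintro ⟨-, h1, h2⟩; exact hc ⟨h1, h2⟩)]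
      rw [if_neg (by rintro ⟨-, -, h1, -, h2⟩; exact hc ⟨h1, h2⟩)]
  · rw [if_neg hg]
    apply List.ext_getElem
    · simp
    intro b hb1 hb2
    have hbX : b < X[a].length := by simpa using hb1
    simp only [List.getElem_mapIdx]
    rw [if_neg (by rintro ⟨h1, h2, -⟩; exact hg ⟨h1, h2⟩)]

-- ===== VERDICT (by name: the statement is the Claim_ definition above) =====
theorem fill_missing_by_class_spec : Claim_equal_fill_missing_by_class := by
  intro X y _ _
  show fill_missing_by_class X y = fill_missing_by_class_alt X y
  rw [pvA_eq_ref, pvB_eq_ref]
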